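-- pv_equiv track=rewrite | github.com/pengooseDev/Coding-test-Archive | Lv.2/148652/PY/atgane.py | f
-- ===== SOURCE A (Python) =====
-- def f(a, n):
--     arr = [0 for _ in range(n + 1)]
--     for i in range(n + 1):
--         arr[i] = a % 5
--         a //= 5
--
--     ans = 0
--     is_zero = False
--     for i in range(n, -1, -1):
--         if is_zero: continue
--         if arr[i] == 1: ans += 4 ** i * 1
--         elif arr[i] == 2:
--             ans += 4 ** i * 2
--             is_zero = True
--         elif arr[i] == 3:
--             ans += 4 ** i * 2
--         elif arr[i] == 4: ans += 4 ** i * 3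
--     return ans
-- ===== SOURCE B (Python) =====
-- def f(a, n):
--     # Single low-to-high pass: no digit list, no 4**i powers, no skip flag.
--     # A digit 2 at position i discards all lower positions, so instead of a
--     # high-to-low scan with a sticky flag we RESET the accumulator to 2*4**i
--     # whenever a 2 appears (later, higher 2s override earlier ones).
--     # Other digits map arithmetically: 0->0, 1->1, 3->2, 4->3 (= d - (d > 2)).
--     # Once a == 0 every remaining digit is 0 and contributes nothing: break.
--     ans = 0
--     pw = 1
--     for _ in range(n + 1):
--         if a == 0:
--             break
--         a, d = divmod(a, 5)
--         if d == 2: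
--             ans = 2 * pw
--         else:
--             ans += (d - (d > 2)) * pw
--         pw *= 4
--     return ans
-- ===== Notes on version B (the rewrite author's own statement) =====
-- stated objective: faster
-- what changed: Replaces A's two-stage computation (build an (n+1)-entry digit array, then scan it high-to-low computing 4**i powers with a sticky skip flag) by a single low-to-high pass with constant state: an incrementally maintained power, an early break once the remaining value is 0 (all further digits are 0), and a RESET of the accumulator to 2*pw when digit 2 appears (a higher 2 overrides, matching A's discard of all lower positions); other digits map arithmetically as d - (d > 2).
import Mathlib
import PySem

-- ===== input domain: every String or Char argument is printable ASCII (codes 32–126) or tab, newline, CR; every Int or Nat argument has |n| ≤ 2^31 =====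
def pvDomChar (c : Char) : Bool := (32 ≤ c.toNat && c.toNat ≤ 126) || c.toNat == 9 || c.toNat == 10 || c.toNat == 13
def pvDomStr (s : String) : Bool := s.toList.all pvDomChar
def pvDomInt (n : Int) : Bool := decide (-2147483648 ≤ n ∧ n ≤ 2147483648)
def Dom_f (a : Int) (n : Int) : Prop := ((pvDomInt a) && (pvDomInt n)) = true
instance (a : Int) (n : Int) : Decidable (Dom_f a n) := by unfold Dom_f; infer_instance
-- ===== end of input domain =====

-- B replaces A's two passes (digit array, then a high-to-low scan with 4**i powers
-- and a sticky skip flag) by ONE low-to-high pass with constant state: an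
-- incremental power, an early break once the value is 0, and an accumulator
-- RESET to 2*pw when digit 2 appears (objective: faster, measured by the check).

-- ===== PORT A =====
-- A's first loop: arr[i] = a % 5; a //= 5, run max(n+1,0) times
-- (Python's list is an array; the i-th assignment into the prefilled list is a push)
def digitsA (a : Int) (k : Nat) : Array Int :=
  ((List.range k).foldl
      (fun (st : Array Int × Int) _ =>
        (st.1.push (PySem.Int.mod st.2 5), PySem.Int.floordiv st.2 5))
      (#[], a)).1

-- A's second loop body at index i, state (ans, is_zero); branch order as in A
def stepA (arr : Array Int) (s : Int × Bool) (i : Nat) : Int × Bool :=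
  if s.2 then s                               -- `if is_zero: continue`
  else if arr.getD i 0 = 1 then (s.1 + 4 ^ i * 1, s.2)
  else if arr.getD i 0 = 2 then (s.1 + 4 ^ i * 2, true)
  else if arr.getD i 0 = 3 then (s.1 + 4 ^ i * 2, s.2)
  else if arr.getD i 0 = 4 then (s.1 + 4 ^ i * 3, s.2)
  else s

-- for i in range(n, -1, -1): indices n, n-1, …, 0 = (List.range (n+1)).reverse
def f (a : Int) (n : Int) : Int :=
  (((List.range (n + 1).toNat).reverse).foldl
      (stepA (digitsA a (n + 1).toNat)) (0, false)).1

-- ===== PORT B =====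
-- B's single loop body, state (ans, pw, a):
--   if a == 0: break; a, d = divmod(a, 5); ans = 2*pw if d == 2 else ans + (d - (d > 2))*pw; pw *= 4
-- (the break is ported as a skip guard: once a = 0 it stays 0, so skipping every
--  remaining iteration is exactly what the break does)
def stepB (st : Int × Int × Int) : Int × Int × Int :=
  if st.2.2 = 0 then st
  else
    let d := PySem.Int.mod st.2.2 5
    let a' := PySem.Int.floordiv st.2.2 5
    (if d = 2 then 2 * st.2.1 else st.1 + (d - (if 2 < d then 1 else 0)) * st.2.1,
     st.2.1 * 4, a')

def f_alt (a : Int) (n : Int) : Int :=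
  (((List.range (n + 1).toNat)).foldl (fun st _ => stepB st) (0, 1, a)).1

-- ===== PRECONDITION & SPEC =====
def Spec_f (a : Int) (n : Int) (out : Int) : Prop := out = f_alt a n
instance (a : Int) (n : Int) (out : Int) : Decidable (Spec_f a n out) := by unfold Spec_f; infer_instance

-- ===== CLAIM (what is proved, stated in full; the proofs are below) =====
def Claim_equal_f : Prop := ∀ (a : Int) (n : Int), Dom_f a n → Spec_f a n (f a n)

-- ===== LEMMAS AND PROOFS =====

-- proof-side specification of the digit list (low digit first)
def digs : Int → Nat → List Int
  | _, 0 => []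
  | a, Nat.succ k => PySem.Int.mod a 5 :: digs (PySem.Int.floordiv a 5) k

def iterdiv (a : Int) : Nat → Int
  | 0 => a
  | Nat.succ k => iterdiv (PySem.Int.floordiv a 5) k

theorem iterdiv_succ (a : Int) (k : Nat) :
    iterdiv a (k + 1) = PySem.Int.floordiv (iterdiv a k) 5 := by
  induction k generalizing a with
  | zero => rfl
  | succ k ih =>
    show iterdiv (PySem.Int.floordiv a 5) (k + 1) = _
    rw [ih]
    rfl

theorem digs_length (a : Int) (k : Nat) : (digs a k).length = k := by
  induction k generalizing a with
  | zero => rfl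
  | succ k ih => simp [digs, ih]

theorem digs_succ_append (a : Int) (k : Nat) :
    digs a (k + 1) = digs a k ++ [PySem.Int.mod (iterdiv a k) 5] := by
  induction k generalizing a with
  | zero => rfl
  | succ k ih =>
    show PySem.Int.mod a 5 :: digs (PySem.Int.floordiv a 5) (k + 1) = _
    rw [ih]
    rfl

-- every extracted digit lies in [0, 5)
theorem digs_bounds (a : Int) (k : Nat) :
    ∀ d ∈ digs a k, 0 ≤ d ∧ d < 5 := by
  induction k generalizing a with
  | zero => intro d hd; simp [digs] at hd
  | succ k ih =>
    intro d hd
    simp only [digs, List.mem_cons] at hd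
    rcases hd with h | h
    · subst h
      exact ⟨PySem.Int.mod_nonneg a (by norm_num), PySem.Int.mod_lt a (by norm_num)⟩
    · exact ih _ d h

theorem digitsA_spec (a : Int) (k : Nat) :
    digitsA a k = ⟨digs a k⟩ ∧
      ((List.range k).foldl
        (fun (st : Array Int × Int) _ =>
          (st.1.push (PySem.Int.mod st.2 5), PySem.Int.floordiv st.2 5))
        (#[], a)).2 = iterdiv a k := by
  induction k with
  | zero => exact ⟨rfl, rfl⟩
  | succ k ih =>
    obtain ⟨h1, h2⟩ := ih
    unfold digitsA at h1 ⊢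
    rw [List.range_succ, List.foldl_append, List.foldl_cons, List.foldl_nil]
    constructor
    · rw [digs_succ_append]
      simp only [h1, h2]
      simp [Array.push]
    · simp only [iterdiv_succ]
      simp only [h2]

-- proof-side version of B's step on the digit list, state (ans, pw)
def stepBl (s : Int × Int) (d : Int) : Int × Int :=
  (if d = 2 then 2 * s.2 else s.1 + (d - (if 2 < d then 1 else 0)) * s.2, s.2 * 4)

-- once the running value hits 0 it stays 0
theorem iterdiv_zero (a : Int) (k : Nat) (h : iterdiv a k = 0) :
    iterdiv a (k + 1) = 0 := by
  rw [iterdiv_succ, h]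
  rfl

-- B's range fold tracks the fold of stepBl over the digit list: the answers agree,
-- the running value is iterdiv, and the powers agree while the value is nonzero
theorem foldB_spec (a : Int) (k : Nat) :
    ((List.range k).foldl (fun st _ => stepB st) (0, 1, a)).2.2 = iterdiv a k ∧
    ((List.range k).foldl (fun st _ => stepB st) (0, 1, a)).1
      = ((digs a k).foldl stepBl (0, 1)).1 ∧
    (iterdiv a k ≠ 0 →
      ((List.range k).foldl (fun st _ => stepB st) (0, 1, a)).2.1
        = ((digs a k).foldl stepBl (0, 1)).2) := by
  induction k with
  | zero => exact ⟨rfl, rfl, fun _ => rfl⟩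
  | succ k ih =>
    obtain ⟨ha, hans, hpw⟩ := ih
    rw [List.range_succ, List.foldl_append, List.foldl_cons, List.foldl_nil,
      digs_succ_append, List.foldl_append, List.foldl_cons, List.foldl_nil]
    generalize hFe : (List.range k).foldl (fun st _ => stepB st) (0, 1, a) = F at ha hans hpw ⊢
    obtain ⟨ans, pw, av⟩ := F
    dsimp only at ha hans hpw
    subst ha
    by_cases h0 : iterdiv a k = 0
    · have hz := iterdiv_zero a k h0
      refine ⟨?_, ?_, fun hc => absurd hz hc⟩
      · simp [stepB, h0, hz]
      · simp [stepB, stepBl, h0, hans]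
    · have hpw' := hpw h0
      refine ⟨?_, ?_, fun _ => ?_⟩ <;>
        simp [stepB, stepBl, h0, iterdiv_succ, hans, hpw']

-- the power component of B's fold is 4^length
theorem foldBl_pow (l : List Int) (s : Int × Int) :
    (l.foldl stepBl s).2 = s.2 * 4 ^ l.length := by
  induction l generalizing s with
  | nil => simp
  | cons d rest ih => simp [List.foldl_cons, stepBl, ih, pow_succ]; ring

-- indexing the array is indexing the underlying list
theorem getD_mk (l : List Int) (i : Nat) :
    (Array.mk l).getD i 0 = l.getD i 0 := by
  simp [Array.getD, List.getD]
  split_ifs with h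
  · simp [List.getElem?_eq_getElem h]
  · simp [List.getElem?_eq_none_iff.2 (Nat.le_of_not_lt h)]

-- A's loop, seen with one more index peeled off the front of the reversed range
theorem foldA_succ (arr : Array Int) (k : Nat) (s : Int × Bool) :
    ((List.range (k + 1)).reverse).foldl (stepA arr) s
      = ((List.range k).reverse).foldl (stepA arr) (stepA arr s k) := by
  rw [List.range_succ]
  simp

-- indices below l.length never see the appended element
theorem foldA_append (l : List Int) (d : Int) (k : Nat) (hk : k ≤ l.length)
    (s : Int × Bool) :
    ((List.range k).reverse).foldl (stepA ⟨l ++ [d]⟩) s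
      = ((List.range k).reverse).foldl (stepA ⟨l⟩) s := by
  induction k generalizing s with
  | zero => rfl
  | succ k ih =>
    have hlt : k < l.length := hk
    have hget : (Array.mk (l ++ [d])).getD k 0 = (Array.mk l).getD k 0 := by
      rw [getD_mk, getD_mk]
      simp [List.getD, List.getElem?_append_left hlt]
    rw [foldA_succ, foldA_succ, ih (Nat.le_of_lt hlt)]
    congr 1
    simp only [stepA, hget]

-- once the flag is set, A's loop is the identity
theorem foldA_frozen (arr : Array Int) (idx : List Nat) (c : Int) :
    idx.foldl (stepA arr) (c, true) = (c, true) := by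
  induction idx with
  | nil => rfl
  | cons i rest ih => simpa [List.foldl_cons, stepA] using ih

-- A's loop only ADDS to the accumulator: linear in the starting ans
theorem foldA_add (arr : Array Int) (idx : List Nat) (c x : Int) (b : Bool) :
    idx.foldl (stepA arr) (c + x, b)
      = ((idx.foldl (stepA arr) (c, b)).1 + x, (idx.foldl (stepA arr) (c, b)).2) := by
  induction idx generalizing c b with
  | nil => rfl
  | cons i rest ih =>
    simp only [List.foldl_cons]
    have hstep : stepA arr (c + x, b) i
        = ((stepA arr (c, b) i).1 + x, (stepA arr (c, b) i).2) := by
      simp only [stepA]; split_ifs <;> simp <;> ring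
    rw [hstep]
    obtain ⟨c', b'⟩ := stepA arr (c, b) i
    exact ih c' b'

-- restatement of foldA_add with the shift on the right
theorem foldA_shift (arr : Array Int) (idx : List Nat) (c : Int) (b : Bool) :
    idx.foldl (stepA arr) (c, b)
      = ((idx.foldl (stepA arr) (0, b)).1 + c, (idx.foldl (stepA arr) (0, b)).2) := by
  have h := foldA_add arr idx 0 c b
  rwa [zero_add] at h

-- the two loops agree on any digit list with entries in [0,5):
-- high-to-low indexed sum with a skip flag = low-to-high pass with reset-on-2
theorem foldA_eq_foldBl (l : List Int) (hb : ∀ d ∈ l, 0 ≤ d ∧ d < 5) :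
    (((List.range l.length).reverse).foldl (stepA ⟨l⟩) (0, false)).1
      = (l.foldl stepBl (0, 1)).1 := by
  induction l using List.reverseRecOn with
  | nil => rfl
  | append_singleton l d ih =>
    have hbl : ∀ e ∈ l, 0 ≤ e ∧ e < 5 := fun e he => hb e (List.mem_append_left _ he)
    have hd : 0 ≤ d ∧ d < 5 := hb d (List.mem_append_right _ (List.mem_singleton_self d))
    have hget : (Array.mk (l ++ [d])).getD l.length 0 = d := by
      rw [getD_mk]
      simp [List.getD]
    have hlen : (l ++ [d]).length = l.length + 1 := by simp
    have hpow : ((l.foldl stepBl (0, 1)).2 : Int) = 4 ^ l.length := by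
      rw [foldBl_pow]; ring
    rw [hlen, foldA_succ, foldA_append l d l.length (Nat.le_refl _),
      List.foldl_append, List.foldl_cons, List.foldl_nil]
    simp only [stepA, stepBl, hget]
    obtain ⟨hd0, hd5⟩ := hd
    generalize (List.range l.length).reverse = idx at ih ⊢
    interval_cases d <;>
      norm_num <;>
      first
        | (rw [foldA_frozen, hpow]; ring)
        | (rw [foldA_shift, ih hbl, hpow]; try ring)
        | (rw [foldA_shift, ih hbl]; try ring)

-- ===== VERDICT (by name: the statement is the Claim_ definition above) =====
theorem f_spec : Claim_equal_f := by
  intro a n _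
  unfold Spec_f f f_alt
  rw [(digitsA_spec a (n + 1).toNat).1, (foldB_spec a (n + 1).toNat).2.1]
  have hb := digs_bounds a (n + 1).toNat
  have h := foldA_eq_foldBl (digs a (n + 1).toNat) hb
  rw [digs_length] at h
  exact h
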